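-- pv_equiv track=rewrite | github.com/TMAdams/Advent_Of_Code | 2015/day_1.py | basement_entry
-- ===== SOURCE A (Python) =====
-- def basement_entry(input: list):
--     for line in input:
--         line = line.rstrip()
--         Floor = 0
--         Count = 0
--         for instruction in line:
--             Count += 1
--             if instruction == '(':
--                 Floor += 1
--             elif instruction == ')':
--                 Floor -= 1
--             if Floor < 0:
--                 return 'Santa enters the basement at instruction ' + str(Count)
--                 break
-- ===== SOURCE B (Python) =====
-- def basement_entry(input: list):
--     for line in input:
--         line = line.rstrip()
--         # table build: cumulative floor after each instruction
--         floors = []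
--         total = 0
--         for d in [1 if c == '(' else -1 if c == ')' else 0 for c in line]:
--             total += d
--             floors.append(total)
--         # search: first position whose cumulative floor is negative
--         hit = next((i for i, f in enumerate(floors) if f < 0), None)
--         if hit is not None:
--             return 'Santa enters the basement at instruction ' + str(hit + 1)
-- ===== Notes on version B (the rewrite author's own statement) =====
-- stated objective: alternative
-- what changed: Replaces A's fused char loop (counter + floor + early return inside one pass) with a build-then-search decomposition: per line it first materialises the cumulative-floor list from a +1/-1/0 delta mapping, then separately scans it for the first negative entry.
import Mathlib
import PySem

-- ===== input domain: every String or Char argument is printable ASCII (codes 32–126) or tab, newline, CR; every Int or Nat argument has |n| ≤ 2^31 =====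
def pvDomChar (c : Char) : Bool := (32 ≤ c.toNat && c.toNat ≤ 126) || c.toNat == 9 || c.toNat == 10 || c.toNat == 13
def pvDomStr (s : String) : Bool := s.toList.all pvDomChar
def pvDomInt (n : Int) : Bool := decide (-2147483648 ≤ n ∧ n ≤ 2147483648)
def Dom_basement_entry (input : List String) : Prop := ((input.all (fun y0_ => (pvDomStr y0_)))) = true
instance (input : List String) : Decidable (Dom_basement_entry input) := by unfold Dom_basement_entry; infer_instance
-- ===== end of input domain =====

-- B replaces A's fused char loop with a per-line build-then-search decomposition
-- (cumulative-floor list built first, then scanned for the first negative entry); same cost.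


-- ===== PORT A =====
-- inner loop of A: Count/Floor carried through the characters, early return at first Floor < 0
def basementGoA : List Char → Int → Int → Option String
  | [], _floor, _count => none
  | c :: rest, floor, count =>
    let count := count + 1
    let floor := if c = '(' then floor + 1 else if c = ')' then floor - 1 else floor
    if floor < 0 then
      some ("Santa enters the basement at instruction " ++ PySem.Int.toStr count)
    else
      basementGoA rest floor count

def basement_entry : List String → Option String
  | [] => none
  | line :: rest =>
    match basementGoA (PySem.Str.rstrip line).toList 0 0 with
    | some s => some s
    | none => basement_entry rest

-- ===== PORT B =====
def basementDelta (c : Char) : Int := if c = '(' then 1 else if c = ')' then -1 else 0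

-- build: cumulative-floor list (Source B's accumulate loop over the delta mapping)
def basementFloors (ds : List Int) : List Int :=
  (ds.foldl (fun (st : List Int × Int) d => (st.1 ++ [st.2 + d], st.2 + d)) ([], 0)).1

def basement_entry_alt : List String → Option String
  | [] => none
  | line :: rest =>
    let floors := basementFloors (((PySem.Str.rstrip line).toList).map basementDelta)
    match (PySem.List.enumerate floors 0).find? (fun p => decide (p.2 < 0)) with
    | some (i, _) => some ("Santa enters the basement at instruction " ++ PySem.Int.toStr (i + 1))
    | none => basement_entry_alt rest

-- ===== PRECONDITION & SPEC =====
def Spec_basement_entry (input : List String) (out : Option String) : Prop := out = basement_entry_alt input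
instance (input : List String) (out : Option String) : Decidable (Spec_basement_entry input out) := by unfold Spec_basement_entry; infer_instance

-- ===== CLAIM (what is proved, stated in full; the proofs are below) =====
def Claim_equal_basement_entry : Prop := ∀ (input : List String), Dom_basement_entry input → Spec_basement_entry input (basement_entry input)

-- ===== LEMMAS AND PROOFS =====
-- running floors starting from f
def basementScan : Int → List Int → List Int
  | _, [] => []
  | f, d :: ds => (f + d) :: basementScan (f + d) ds

lemma basementFloors_aux (ds : List Int) : ∀ (acc : List Int) (t : Int),
    (ds.foldl (fun (st : List Int × Int) d => (st.1 ++ [st.2 + d], st.2 + d)) (acc, t)).1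
      = acc ++ basementScan t ds := by
  induction ds with
  | nil => intro acc t; simp [basementScan]
  | cons d ds ih =>
      intro acc t
      simp only [List.foldl_cons, basementScan]
      rw [ih]
      simp

lemma basementFloors_eq (ds : List Int) : basementFloors ds = basementScan 0 ds := by
  simpa using basementFloors_aux ds [] 0

lemma basementGoA_eq (cs : List Char) : ∀ (floor count : Int),
    basementGoA cs floor count
      = ((PySem.List.enumerate (basementScan floor (cs.map basementDelta)) (count + 1)).find?
            (fun p => decide (p.2 < 0))).map
          (fun p => "Santa enters the basement at instruction " ++ PySem.Int.toStr p.1) := by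
  induction cs with
  | nil => intro floor count; simp [basementGoA, basementScan, PySem.List.enumerate_nil]
  | cons c rest ih =>
      intro floor count
      have hf : (if c = '(' then floor + 1 else if c = ')' then floor - 1 else floor)
          = floor + basementDelta c := by
        simp only [basementDelta]; split_ifs <;> ring
      simp only [basementGoA, hf, List.map_cons, basementScan, PySem.List.enumerate_cons,
        List.find?_cons]
      by_cases h : floor + basementDelta c < 0
      · simp [h]
      · simp only [h, decide_false]
        rw [ih]
        ring_nf
        simp

-- shifting the enumeration start by one absorbs the '+ 1' in B's message
lemma basementEnumShift (xs : List Int) : ∀ (s : Int),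
    ((PySem.List.enumerate xs s).find? (fun p => decide (p.2 < 0))).map
        (fun p => "Santa enters the basement at instruction " ++ PySem.Int.toStr (p.1 + 1))
      = ((PySem.List.enumerate xs (s + 1)).find? (fun p => decide (p.2 < 0))).map
          (fun p => "Santa enters the basement at instruction " ++ PySem.Int.toStr p.1) := by
  induction xs with
  | nil => intro s; simp [PySem.List.enumerate_nil]
  | cons x xs ih =>
      intro s
      simp only [PySem.List.enumerate_cons, List.find?_cons]
      by_cases h : x < 0
      · simp [h]
      · simp only [h, decide_false]
        exact ih (s + 1)

lemma basement_line_eq (line : String) :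
    basementGoA (PySem.Str.rstrip line).toList 0 0
      = ((PySem.List.enumerate
            (basementFloors (((PySem.Str.rstrip line).toList).map basementDelta)) 0).find?
            (fun p => decide (p.2 < 0))).map
          (fun p => "Santa enters the basement at instruction " ++ PySem.Int.toStr (p.1 + 1)) := by
  rw [basementGoA_eq, basementFloors_eq, basementEnumShift]

-- ===== VERDICT (by name: the statement is the Claim_ definition above) =====
lemma basement_all_eq (input : List String) : basement_entry input = basement_entry_alt input := by
  induction input with
  | nil => rfl
  | cons line rest ih =>
      simp only [basement_entry, basement_entry_alt]
      rw [basement_line_eq line]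
      cases h : ((PySem.List.enumerate
            (basementFloors (((PySem.Str.rstrip line).toList).map basementDelta)) 0).find?
            (fun p => decide (p.2 < 0))) with
      | none => simpa using ih
      | some p => rcases p with ⟨i, v⟩; simp

theorem basement_entry_spec : Claim_equal_basement_entry := by
  intro input _
  exact basement_all_eq input
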